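-- pv_equiv track=rewrite | github.com/EthanTon/Curve_Generation_Tool | src/auto/logic.py | _approx_silhouette
-- ===== SOURCE A (Python) =====
-- def _approx_silhouette(path, width):
--     sil = set()
--     r = width // 2 + 1
--     r_sq = r * r
--     for x, z in path:
--         for dx in range(-r, r + 1):
--             for dz in range(-r, r + 1):
--                 if dx * dx + dz * dz <= r_sq:
--                     sil.add((x + dx, z + dz))
--     return sil
-- ===== SOURCE B (Python) =====
-- def _approx_silhouette(path, width):
--     r = width // 2 + 1
--     r_sq = r * r
--     # Scanline disk: for each column dx the disk covers a contiguous chord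
--     # dz in [-h, h], where h = isqrt(r_sq - dx*dx); no per-cell distance test.
--     spans = []
--     for dx in range(-r, r + 1):
--         rem = r_sq - dx * dx
--         h = 0
--         while (h + 1) * (h + 1) <= rem:
--             h += 1
--         spans.append((dx, h))
--     sil = set()
--     for x, z in path:
--         for dx, h in spans:
--             for dz in range(-h, h + 1):
--                 sil.add((x + dx, z + dz))
--     return sil
-- ===== Notes on version B (the rewrite author's own statement) =====
-- stated objective: alternative
-- what changed: B rasterizes the disk by scanlines: for each column dx it computes the chord half-width h = isqrt(r_sq - dx*dx) once (by an incrementing integer-sqrt loop) and stamps the contiguous dz-range [-h, h] at every path point, eliminating A's per-cell distance test over the full bounding square.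
import Mathlib
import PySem

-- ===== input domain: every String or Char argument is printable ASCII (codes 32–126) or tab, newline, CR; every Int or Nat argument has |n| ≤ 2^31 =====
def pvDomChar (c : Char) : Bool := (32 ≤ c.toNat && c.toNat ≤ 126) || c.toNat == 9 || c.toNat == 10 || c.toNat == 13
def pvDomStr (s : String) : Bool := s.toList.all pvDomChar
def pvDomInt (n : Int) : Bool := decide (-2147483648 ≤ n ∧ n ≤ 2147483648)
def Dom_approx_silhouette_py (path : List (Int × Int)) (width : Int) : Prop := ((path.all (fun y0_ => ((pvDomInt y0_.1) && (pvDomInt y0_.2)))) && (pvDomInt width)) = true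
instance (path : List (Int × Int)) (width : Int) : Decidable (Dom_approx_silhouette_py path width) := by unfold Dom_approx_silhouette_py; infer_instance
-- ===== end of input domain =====

-- B replaces A's per-cell distance test by a scanline decomposition: each disk column dx
-- covers the contiguous chord dz ∈ [-h, h] with h = isqrt(r²-dx²) (objective: alternative).

-- ===== PORT A =====
def approx_silhouette_py (path : List (Int × Int)) (width : Int) : List (Int × Int) :=
  let r := PySem.Int.floordiv width 2 + 1
  let r_sq := r * r
  path.foldl (fun sil p =>
    (PySem.List.pyRange (-r) (r + 1) 1).foldl (fun sil dx =>
      (PySem.List.pyRange (-r) (r + 1) 1).foldl (fun sil dz =>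
        if dx * dx + dz * dz ≤ r_sq then PySem.Set.add sil (p.1 + dx, p.2 + dz) else sil)
        sil) sil) PySem.Set.empty

-- ===== PORT B =====
-- 'h = 0; while (h+1)*(h+1) <= rem: h += 1' — fuel-bounded fold (rem.toNat iterations
-- suffice since the final h satisfies h ≤ rem); the loop body is transcribed as is.
def pyChord (rem : Int) : Int :=
  (List.range rem.toNat).foldl (fun h _ => if (h + 1) * (h + 1) ≤ rem then h + 1 else h) 0

def approx_silhouette_py_alt (path : List (Int × Int)) (width : Int) : List (Int × Int) :=
  let r := PySem.Int.floordiv width 2 + 1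
  let r_sq := r * r
  let spans := (PySem.List.pyRange (-r) (r + 1) 1).foldl
    (fun acc dx => acc ++ [(dx, pyChord (r_sq - dx * dx))]) []
  path.foldl (fun sil p =>
    spans.foldl (fun sil s =>
      (PySem.List.pyRange (-s.2) (s.2 + 1) 1).foldl
        (fun sil dz => PySem.Set.add sil (p.1 + s.1, p.2 + dz)) sil) sil) PySem.Set.empty

-- ===== PRECONDITION & SPEC =====
def Spec_approx_silhouette_py (path : List (Int × Int)) (width : Int) (out : List (Int × Int)) : Prop := out = approx_silhouette_py_alt path width
instance (path : List (Int × Int)) (width : Int) (out : List (Int × Int)) : Decidable (Spec_approx_silhouette_py path width out) := by unfold Spec_approx_silhouette_py; infer_instance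

-- ===== CLAIM =====
def Claim_equal_approx_silhouette_py : Prop := ∀ (path : List (Int × Int)) (width : Int), Dom_approx_silhouette_py path width → Spec_approx_silhouette_py path width (approx_silhouette_py path width)

-- ===== LEMMAS AND PROOFS =====

-- pyChord rem is the integer square root of rem (for rem ≥ 0).
theorem pyChord_aux (rem : Int) (h0 : 0 ≤ rem) (k : Nat) :
    0 ≤ (List.range k).foldl (fun h _ => if (h + 1) * (h + 1) ≤ rem then h + 1 else h) 0 ∧
    (List.range k).foldl (fun h _ => if (h + 1) * (h + 1) ≤ rem then h + 1 else h) 0 ≤ (k : Int) ∧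
    ((List.range k).foldl (fun h _ => if (h + 1) * (h + 1) ≤ rem then h + 1 else h) 0) *
      ((List.range k).foldl (fun h _ => if (h + 1) * (h + 1) ≤ rem then h + 1 else h) 0) ≤ rem ∧
    ((List.range k).foldl (fun h _ => if (h + 1) * (h + 1) ≤ rem then h + 1 else h) 0 < (k : Int) →
      rem < ((List.range k).foldl (fun h _ => if (h + 1) * (h + 1) ≤ rem then h + 1 else h) 0 + 1) *
            ((List.range k).foldl (fun h _ => if (h + 1) * (h + 1) ≤ rem then h + 1 else h) 0 + 1)) := by
  induction k with
  | zero => simpa using h0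
  | succ n ih =>
    obtain ⟨i1, i2, i3, i4⟩ := ih
    rw [List.range_succ, List.foldl_append] at *
    by_cases ht : ((List.range n).foldl (fun h _ => if (h + 1) * (h + 1) ≤ rem then h + 1 else h) 0 + 1) *
        ((List.range n).foldl (fun h _ => if (h + 1) * (h + 1) ≤ rem then h + 1 else h) 0 + 1) ≤ rem
    · simp only [List.foldl_cons, List.foldl_nil, if_pos ht]
      have hnk : ¬ ((List.range n).foldl (fun h _ => if (h + 1) * (h + 1) ≤ rem then h + 1 else h) 0 < (n : Int)) := by
        intro hlt; exact absurd ht (by linarith [i4 hlt])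
      push_cast
      refine ⟨by linarith, by omega, ht, fun hlt => absurd hlt (by omega)⟩
    · simp only [List.foldl_cons, List.foldl_nil, if_neg ht]
      push_cast
      exact ⟨i1, by omega, i3, fun _ => by linarith⟩

theorem pyChord_spec (rem : Int) (h0 : 0 ≤ rem) :
    0 ≤ pyChord rem ∧ pyChord rem * pyChord rem ≤ rem ∧
      rem < (pyChord rem + 1) * (pyChord rem + 1) := by
  obtain ⟨i1, i2, i3, i4⟩ := pyChord_aux rem h0 rem.toNat
  unfold pyChord
  refine ⟨i1, i3, ?_⟩
  by_cases hlt : (List.range rem.toNat).foldl (fun h _ => if (h + 1) * (h + 1) ≤ rem then h + 1 else h) 0 < (rem.toNat : Int)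
  · exact i4 hlt
  · have he : (List.range rem.toNat).foldl (fun h _ => if (h + 1) * (h + 1) ≤ rem then h + 1 else h) 0 = rem := by
      rw [Int.toNat_of_nonneg h0] at hlt; omega
    rw [he] at i3 ⊢
    nlinarith [i3, h0]

-- the chord is within the bounding square
theorem pyChord_le (rem r : Int) (h0 : 0 ≤ rem) (hr : 0 ≤ r) (hle : rem ≤ r * r) :
    pyChord rem ≤ r := by
  obtain ⟨h1, h2, h3⟩ := pyChord_spec rem h0
  nlinarith

-- an interval filter of a range is a range
theorem filter_range_interval (a b c d : Int) (p : Int → Bool)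
    (hp : ∀ z, p z = true ↔ c ≤ z ∧ z ≤ d)
    (hac : a ≤ c) (hdb : d + 1 ≤ b) (hcd : c ≤ d) :
    (PySem.List.pyRange a b 1).filter p = PySem.List.pyRange c (d + 1) 1 := by
  rw [PySem.List.pyRange_one_append a c b hac (by omega),
      PySem.List.pyRange_one_append c (d + 1) b (by omega) hdb,
      List.filter_append, List.filter_append]
  have h1 : (PySem.List.pyRange a c 1).filter p = [] := by
    rw [List.filter_eq_nil_iff]
    intro x hx
    have := (PySem.List.mem_pyRange_one).1 hx
    simp only [hp]; omega
  have h2 : (PySem.List.pyRange c (d + 1) 1).filter p = PySem.List.pyRange c (d + 1) 1 := by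
    rw [List.filter_eq_self]
    intro x hx
    have := (PySem.List.mem_pyRange_one).1 hx
    rw [hp]; omega
  have h3 : (PySem.List.pyRange (d + 1) b 1).filter p = [] := by
    rw [List.filter_eq_nil_iff]
    intro x hx
    have := (PySem.List.mem_pyRange_one).1 hx
    simp only [hp]; omega
  rw [h1, h2, h3, List.nil_append, List.append_nil]

-- the dz-loop with its distance test = the filtered fold
theorem inner_row (x z dx r_sq : Int) (dzs : List Int) (s : List (Int × Int)) :
    dzs.foldl (fun sil dz =>
        if dx * dx + dz * dz ≤ r_sq then PySem.Set.add sil (x + dx, z + dz) else sil) s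
      = (dzs.filter (fun dz => decide (dx * dx + dz * dz ≤ r_sq))).foldl
          (fun sil dz => PySem.Set.add sil (x + dx, z + dz)) s := by
  exact PySem.List.foldl_ite_eq_foldl_filter _ _ _ _

-- A's row at column dx = B's chord row, for dx in the range
theorem row_eq (x z r dx : Int) (s : List (Int × Int)) (hmem : -r ≤ dx ∧ dx < r + 1) :
    (PySem.List.pyRange (-r) (r + 1) 1).foldl (fun sil dz =>
        if dx * dx + dz * dz ≤ r * r then PySem.Set.add sil (x + dx, z + dz) else sil) s
      = (PySem.List.pyRange (-(pyChord (r * r - dx * dx))) (pyChord (r * r - dx * dx) + 1) 1).foldl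
          (fun sil dz => PySem.Set.add sil (x + dx, z + dz)) s := by
  obtain ⟨hl, hu⟩ := hmem
  have hr : 0 ≤ r := by omega
  have hrem : 0 ≤ r * r - dx * dx := by nlinarith
  obtain ⟨c1, c2, c3⟩ := pyChord_spec (r * r - dx * dx) hrem
  have hcr : pyChord (r * r - dx * dx) ≤ r := pyChord_le _ r hrem hr (by nlinarith)
  rw [inner_row, filter_range_interval (-r) (r + 1) (-(pyChord (r * r - dx * dx)))
      (pyChord (r * r - dx * dx)) _ ?_ (by omega) (by omega) (by omega)]
  intro dz
  simp only [decide_eq_true_eq]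
  constructor
  · intro hd
    constructor
    · by_contra hc; push Not at hc; nlinarith
    · by_contra hc; push Not at hc; nlinarith
  · intro ⟨ha, hb⟩; nlinarith

-- ===== VERDICT =====
theorem approx_silhouette_py_spec : Claim_equal_approx_silhouette_py := by
  intro path width _
  unfold Spec_approx_silhouette_py approx_silhouette_py approx_silhouette_py_alt
  simp only [PySem.List.foldl_append_singleton_eq_map, List.nil_append, List.foldl_map]
  refine PySem.List.foldl_congr_mem path _ _ _ (fun sil p _ => ?_)
  exact PySem.List.foldl_congr_mem _ _ _ sil
    (fun sil dx hdx => row_eq p.1 p.2 _ dx sil ((PySem.List.mem_pyRange_one).1 hdx))
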